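-- pv_equiv track=rewrite | github.com/LiquidFun/cyber-security | error_correction/hamming_error_correction.py | calculate_sum_of_bit_values
-- ===== SOURCE A (Python) =====
-- def calculate_sum_of_bit_values(number_of_data_and_redundant_bits: int, position_of_next_redundant_bit: int,
--                                 hamming_code: list) -> int:
--
--     sum_of_bit_values = 0
--     j = position_of_next_redundant_bit - 1
--
--     # Check all relevant bits in the array for their value
--     # https://users.cis.fiu.edu/~downeyt/cop3402/hamming.html
--     while j < number_of_data_and_redundant_bits:
--         for i in range(position_of_next_redundant_bit):
--             sum_of_bit_values += hamming_code[j]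
--             j += 1
--             if j >= number_of_data_and_redundant_bits:
--                 break
--
--         j += position_of_next_redundant_bit
--
--     return sum_of_bit_values
-- ===== SOURCE B (Python) =====
-- def calculate_sum_of_bit_values(number_of_data_and_redundant_bits: int, position_of_next_redundant_bit: int,
--                                 hamming_code: list) -> int:
--     # Simpler: one flat pass with a closed-form block-inclusion test instead of
--     # nested while/for with break and block-advance bookkeeping.
--     p = position_of_next_redundant_bit
--     total = 0
--     for j in range(p - 1, number_of_data_and_redundant_bits):
--         if ((j - (p - 1)) // p) % 2 == 0:
--             total += hamming_code[j]
--     return total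
-- ===== Notes on version B (the rewrite author's own statement) =====
-- stated objective: simpler
-- what changed: Replaces the nested while/for-with-break block-advance bookkeeping by a single flat pass over range(p-1, n) that adds hamming_code[j] when a closed-form modular test ((j-(p-1))//p) % 2 == 0 says j lies in an included block.
import Mathlib
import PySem

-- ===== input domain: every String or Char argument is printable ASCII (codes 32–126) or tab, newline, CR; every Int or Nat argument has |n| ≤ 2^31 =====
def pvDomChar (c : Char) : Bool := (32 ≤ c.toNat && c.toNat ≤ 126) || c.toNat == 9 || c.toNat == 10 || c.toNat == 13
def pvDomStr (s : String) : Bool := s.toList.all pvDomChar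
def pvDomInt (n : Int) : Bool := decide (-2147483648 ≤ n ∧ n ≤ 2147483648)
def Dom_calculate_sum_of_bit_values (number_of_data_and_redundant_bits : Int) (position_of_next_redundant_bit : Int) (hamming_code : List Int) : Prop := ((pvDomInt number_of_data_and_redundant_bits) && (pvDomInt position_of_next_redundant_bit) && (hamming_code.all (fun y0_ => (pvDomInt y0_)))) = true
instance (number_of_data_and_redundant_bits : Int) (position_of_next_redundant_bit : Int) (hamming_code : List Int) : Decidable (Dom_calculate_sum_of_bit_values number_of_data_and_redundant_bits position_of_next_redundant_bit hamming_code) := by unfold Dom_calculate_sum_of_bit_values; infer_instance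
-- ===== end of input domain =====

-- B replaces A's nested while/for-with-break block bookkeeping by one flat pass over
-- range(p-1, n) with a closed-form inclusion test (simpler decomposition; same cost).

-- ===== PORT A =====
-- inner 'for i in range(position_of_next_redundant_bit)' with its break; state (j, sum)
def pvInnerA (n : Int) (hc : List Int) : Nat → Int → Int → (Int × Int)
  | 0, j, s => (j, s)
  | k+1, j, s =>
      let s' := s + PySem.List.pyGetD hc j 0
      let j' := j + 1
      if n ≤ j' then (j', s') else pvInnerA n hc k j' s'

-- outer 'while j < n' loop; fuel only makes the recursion total (unreached under Pre_)
def pvOuterA (n p : Int) (hc : List Int) : Nat → Int → Int → Int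
  | 0, _, s => s
  | f+1, j, s =>
      if j < n then
        let r := pvInnerA n hc p.toNat j s
        pvOuterA n p hc f (r.1 + p) r.2
      else s

def calculate_sum_of_bit_values (number_of_data_and_redundant_bits : Int) (position_of_next_redundant_bit : Int) (hamming_code : List Int) : Int :=
  pvOuterA number_of_data_and_redundant_bits position_of_next_redundant_bit hamming_code
    ((number_of_data_and_redundant_bits - (position_of_next_redundant_bit - 1)).toNat + 1)
    (position_of_next_redundant_bit - 1) 0

-- ===== PORT B =====
def calculate_sum_of_bit_values_alt (number_of_data_and_redundant_bits : Int) (position_of_next_redundant_bit : Int) (hamming_code : List Int) : Int :=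
  (PySem.List.pyRange (position_of_next_redundant_bit - 1) number_of_data_and_redundant_bits 1).foldl
    (fun total j =>
      if PySem.Int.mod (PySem.Int.floordiv (j - (position_of_next_redundant_bit - 1)) position_of_next_redundant_bit) 2 = 0
      then total + PySem.List.pyGetD hamming_code j 0
      else total) 0

-- ===== PRECONDITION & SPEC =====
-- Pre_ excludes exactly the inputs where Python A does not return normally:
-- when the while loop runs at all (n > p-1), p ≤ 0 makes it diverge (p = 0 never advances j, p < 0 moves it backwards),
-- and an 'included' index reaching beyond the list makes A raise IndexError (B raises there too);
-- the if-expression is the last included index's offset, so the bound says 'all accessed indices are in range'.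
def Pre_calculate_sum_of_bit_values (number_of_data_and_redundant_bits : Int) (position_of_next_redundant_bit : Int) (hamming_code : List Int) : Prop :=
  number_of_data_and_redundant_bits ≤ position_of_next_redundant_bit - 1 ∨
  (1 ≤ position_of_next_redundant_bit ∧
    (position_of_next_redundant_bit - 1) +
      (if (number_of_data_and_redundant_bits - position_of_next_redundant_bit) % (2 * position_of_next_redundant_bit) < position_of_next_redundant_bit
       then number_of_data_and_redundant_bits - position_of_next_redundant_bit
       else number_of_data_and_redundant_bits - position_of_next_redundant_bit
            - (number_of_data_and_redundant_bits - position_of_next_redundant_bit) % (2 * position_of_next_redundant_bit)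
            + position_of_next_redundant_bit - 1) < (hamming_code.length : Int))
instance (number_of_data_and_redundant_bits : Int) (position_of_next_redundant_bit : Int) (hamming_code : List Int) : Decidable (Pre_calculate_sum_of_bit_values number_of_data_and_redundant_bits position_of_next_redundant_bit hamming_code) := by unfold Pre_calculate_sum_of_bit_values; infer_instance

def pvWitness_calculate_sum_of_bit_values : Int × Int × List Int := (7, 2, [1, 0, 1, 1, 0, 1, 0])

def Spec_calculate_sum_of_bit_values (number_of_data_and_redundant_bits : Int) (position_of_next_redundant_bit : Int) (hamming_code : List Int) (out : Int) : Prop := out = calculate_sum_of_bit_values_alt number_of_data_and_redundant_bits position_of_next_redundant_bit hamming_code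
instance (number_of_data_and_redundant_bits : Int) (position_of_next_redundant_bit : Int) (hamming_code : List Int) (out : Int) : Decidable (Spec_calculate_sum_of_bit_values number_of_data_and_redundant_bits position_of_next_redundant_bit hamming_code out) := by unfold Spec_calculate_sum_of_bit_values; infer_instance

-- ===== CLAIM (what is proved, stated in full; the proofs are below) =====
def Claim_equal_calculate_sum_of_bit_values : Prop := ∀ (number_of_data_and_redundant_bits : Int) (position_of_next_redundant_bit : Int) (hamming_code : List Int), Dom_calculate_sum_of_bit_values number_of_data_and_redundant_bits position_of_next_redundant_bit hamming_code → Pre_calculate_sum_of_bit_values number_of_data_and_redundant_bits position_of_next_redundant_bit hamming_code → Spec_calculate_sum_of_bit_values number_of_data_and_redundant_bits position_of_next_redundant_bit hamming_code (calculate_sum_of_bit_values number_of_data_and_redundant_bits position_of_next_redundant_bit hamming_code)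

-- ===== LEMMAS AND PROOFS =====

-- conditional sum over [b, n) — what B computes
def pvCsum (n p : Int) (hc : List Int) (b : Int) : Int :=
  ((PySem.List.pyRange b n 1).map (fun j => if PySem.Int.mod (PySem.Int.floordiv (j - (p - 1)) p) 2 = 0 then PySem.List.pyGetD hc j 0 else 0)).sum

-- unconditional sum over [b, e) — what one inner for-loop pass accumulates
def pvUsum (hc : List Int) (b e : Int) : Int :=
  ((PySem.List.pyRange b e 1).map (fun j => PySem.List.pyGetD hc j 0)).sum

lemma pvUsum_nil (hc : List Int) (b e : Int) (h : e ≤ b) : pvUsum hc b e = 0 := by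
  simp [pvUsum, PySem.List.pyRange_one_eq_nil h]

lemma pvUsum_cons (hc : List Int) (b e : Int) (h : b < e) :
    pvUsum hc b e = PySem.List.pyGetD hc b 0 + pvUsum hc (b + 1) e := by
  rw [pvUsum, PySem.List.pyRange_one_cons h]
  simp [pvUsum]

lemma pvInnerA_eq (n : Int) (hc : List Int) :
    ∀ (k : Nat) (j s : Int), 1 ≤ k → j < n →
      pvInnerA n hc k j s = (min (j + (k : Int)) n, s + pvUsum hc j (min (j + (k : Int)) n)) := by
  intro k
  induction k with
  | zero => intro j s hk; omega
  | succ k ih =>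
    intro j s _ hj
    rw [pvInnerA]
    by_cases hstop : n ≤ j + 1
    · have hn : n = j + 1 := by omega
      have hmin : min (j + ((k + 1 : Nat) : Int)) n = j + 1 := by push_cast; omega
      simp only [hstop, if_pos, hmin]
      rw [pvUsum_cons hc j (j+1) (by omega), pvUsum_nil hc (j+1) (j+1) (by omega)]
      simp
    · simp only [hstop, if_neg, not_false_iff]
      rcases Nat.eq_zero_or_pos k with hk0 | hk1
      · subst hk0
        rw [pvInnerA]
        have hmin : min (j + ((1 : Nat) : Int)) n = j + 1 := by push_cast; omega
        rw [hmin, pvUsum_cons hc j (j+1) (by omega), pvUsum_nil hc (j+1) (j+1) (by omega)]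
        simp
      · rw [ih (j+1) (s + PySem.List.pyGetD hc j 0) hk1 (by omega)]
        have hmin : min (j + ((k + 1 : Nat) : Int)) n = min (j + 1 + (k : Int)) n := by
          push_cast; omega
        rw [hmin]
        have hlt : j < min (j + 1 + (k : Int)) n := by
          have : (1 : Int) ≤ (k : Int) := by exact_mod_cast hk1
          omega
        rw [pvUsum_cons hc j _ hlt]
        ring_nf

-- when the loop index is already past n, the outer loop returns the accumulator
lemma pvOuterA_done (n p : Int) (hc : List Int) (f : Nat) (j s : Int) (h : ¬ j < n) :
    pvOuterA n p hc f j s = s := by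
  cases f with
  | zero => rfl
  | succ f => rw [pvOuterA]; simp [h]

-- indices in the first half of a block satisfy B's test, those in the second half do not
lemma pvCond_true (p t j : Int) (hp : 1 ≤ p) (_ht : 0 ≤ t)
    (hlo : p - 1 + 2 * p * t ≤ j) (hhi : j < p - 1 + 2 * p * t + p) : PySem.Int.mod (PySem.Int.floordiv (j - (p - 1)) p) 2 = 0 := by
  have ha : p * (2 * t) = 2 * p * t := by ring
  rw [PySem.Int.mod_eq_emod_of_pos (by omega : (0:Int) < 2),
      PySem.Int.floordiv_eq_ediv_of_pos (by omega : (0:Int) < p)]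
  have h1 : (j - (p - 1)) / p = 2 * t := by
    have hr : j - (p - 1) = (j - (p - 1) - p * (2 * t)) + p * (2 * t) := by ring
    rw [hr, Int.add_mul_ediv_left _ _ (by omega : p ≠ 0)]
    rw [Int.ediv_eq_zero_of_lt (by omega) (by omega)]
    omega
  rw [h1]; omega

lemma pvCond_false (p t j : Int) (hp : 1 ≤ p) (_ht : 0 ≤ t)
    (hlo : p - 1 + 2 * p * t + p ≤ j) (hhi : j < p - 1 + 2 * p * (t + 1)) : ¬ PySem.Int.mod (PySem.Int.floordiv (j - (p - 1)) p) 2 = 0 := by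
  have ha : p * (2 * t + 1) = 2 * p * t + p := by ring
  have hb2 : 2 * p * (t + 1) = 2 * p * t + 2 * p := by ring
  rw [PySem.Int.mod_eq_emod_of_pos (by omega : (0:Int) < 2),
      PySem.Int.floordiv_eq_ediv_of_pos (by omega : (0:Int) < p)]
  have h1 : (j - (p - 1)) / p = 2 * t + 1 := by
    have hr : j - (p - 1) = (j - (p - 1) - p * (2 * t + 1)) + p * (2 * t + 1) := by ring
    rw [hr, Int.add_mul_ediv_left _ _ (by omega : p ≠ 0)]
    rw [Int.ediv_eq_zero_of_lt (by omega) (by omega)]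
    omega
  rw [h1]; omega

-- splitting pvCsum at a block start: one included run, one excluded run, rest
lemma pvCsum_block (n p : Int) (hc : List Int) (t : Int) (hp : 1 ≤ p) (ht : 0 ≤ t)
    (hb : p - 1 + 2 * p * t < n) :
    pvCsum n p hc (p - 1 + 2 * p * t) =
      pvUsum hc (p - 1 + 2 * p * t) (min (p - 1 + 2 * p * t + p) n) +
      pvCsum n p hc (p - 1 + 2 * p * (t + 1)) := by
  set b := p - 1 + 2 * p * t with hbdef
  have hg : p - 1 + 2 * p * (t + 1) = b + 2 * p := by rw [hbdef]; ring
  have h1 : b ≤ min (b + p) n := by omega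
  have h2 : min (b + p) n ≤ min (b + 2 * p) n := by omega
  have h3 : min (b + 2 * p) n ≤ n := by omega
  unfold pvCsum pvUsum
  rw [PySem.List.pyRange_one_append b (min (b + p) n) n h1 (le_trans h2 h3),
      PySem.List.pyRange_one_append (min (b + p) n) (min (b + 2 * p) n) n h2 h3]
  rw [List.map_append, List.map_append, List.sum_append, List.sum_append]
  have e1 : ((PySem.List.pyRange b (min (b + p) n) 1).map
      (fun j => if PySem.Int.mod (PySem.Int.floordiv (j - (p - 1)) p) 2 = 0 then PySem.List.pyGetD hc j 0 else 0)) =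
      ((PySem.List.pyRange b (min (b + p) n) 1).map (fun j => PySem.List.pyGetD hc j 0)) := by
    apply List.map_congr_left
    intro j hj
    rw [PySem.List.mem_pyRange_one] at hj
    rw [if_pos (pvCond_true p t j hp ht (by omega) (by omega))]
  have e2 : ((PySem.List.pyRange (min (b + p) n) (min (b + 2 * p) n) 1).map
      (fun j => if PySem.Int.mod (PySem.Int.floordiv (j - (p - 1)) p) 2 = 0 then PySem.List.pyGetD hc j 0 else 0)).sum = 0 := by
    apply List.sum_eq_zero
    intro x hx
    simp only [List.mem_map] at hx
    obtain ⟨j, hj, rfl⟩ := hx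
    rw [PySem.List.mem_pyRange_one] at hj
    rw [if_neg (pvCond_false p t j hp ht (by omega) (by omega))]
  have e3 : PySem.List.pyRange (min (b + 2 * p) n) n 1 =
      PySem.List.pyRange (p - 1 + 2 * p * (t + 1)) n 1 := by
    by_cases h : b + 2 * p ≤ n
    · have : min (b + 2 * p) n = b + 2 * p := by omega
      rw [this]; congr 1; omega
    · have hm : min (b + 2 * p) n = n := by omega
      rw [hm, PySem.List.pyRange_one_eq_nil (le_refl n),
          PySem.List.pyRange_one_eq_nil (by omega : n ≤ p - 1 + 2 * p * (t + 1))]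
  rw [e1, e2, e3]
  ring

-- main invariant: from any block start, A's outer loop adds exactly B's conditional sum
lemma pvOuterA_eq_csum (n p : Int) (hc : List Int) (hp : 1 ≤ p) :
    ∀ (f : Nat) (b s t : Int), 0 ≤ t → b = p - 1 + 2 * p * t → (n - b).toNat < f →
      pvOuterA n p hc f b s = s + pvCsum n p hc b := by
  intro f
  induction f with
  | zero => intro b s t ht hb hf; omega
  | succ f ih =>
    intro b s t ht hb hf
    have hg : 2 * p * (t + 1) = 2 * p * t + 2 * p := by ring
    by_cases hbn : b < n
    · rw [pvOuterA]
      simp only [hbn, if_pos]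
      have hk : 1 ≤ p.toNat := by omega
      have hkc : ((p.toNat : Nat) : Int) = p := by omega
      rw [pvInnerA_eq n hc p.toNat b s hk hbn, hkc]
      by_cases hcase : b + p ≤ n
      · -- full inner pass: next index is the next block start
        have hmin : min (b + p) n = b + p := by omega
        rw [hmin]
        have hb' : b + p + p = p - 1 + 2 * p * (t + 1) := by rw [hb]; ring
        rw [hb', ih (p - 1 + 2 * p * (t + 1)) _ (t + 1) (by omega) rfl (by omega)]
        rw [hb] at *
        rw [pvCsum_block n p hc t hp ht (by omega), hmin]
        ring
      · -- inner pass broke at n: loop is over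
        have hmin : min (b + p) n = n := by omega
        rw [hmin]
        rw [pvOuterA_done n p hc f (n + p) _ (by omega)]
        rw [hb] at *
        rw [pvCsum_block n p hc t hp ht (by omega), hmin]
        have : pvCsum n p hc (p - 1 + 2 * p * (t + 1)) = 0 := by
          unfold pvCsum
          rw [PySem.List.pyRange_one_eq_nil (by omega : n ≤ p - 1 + 2 * p * (t + 1))]
          simp
        rw [this]
        ring_nf
    · rw [pvOuterA_done n p hc (f + 1) b s hbn]
      unfold pvCsum
      rw [PySem.List.pyRange_one_eq_nil (by omega : n ≤ b)]
      simp

-- B's fold with a conditional add is the conditional sum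
lemma pvFoldl_csum (p : Int) (hc : List Int) :
    ∀ (l : List Int) (s : Int),
      l.foldl (fun total j => if PySem.Int.mod (PySem.Int.floordiv (j - (p - 1)) p) 2 = 0
        then total + PySem.List.pyGetD hc j 0 else total) s =
      s + (l.map (fun j => if PySem.Int.mod (PySem.Int.floordiv (j - (p - 1)) p) 2 = 0 then PySem.List.pyGetD hc j 0 else 0)).sum := by
  intro l
  induction l with
  | nil => intro s; simp
  | cons x xs ih =>
    intro s
    rw [List.foldl_cons, List.map_cons, List.sum_cons, ih]
    by_cases hx : PySem.Int.mod (PySem.Int.floordiv (x - (p - 1)) p) 2 = 0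
    · rw [if_pos hx, if_pos (by exact hx)]; ring
    · rw [if_neg hx, if_neg (by exact hx)]; ring

-- ===== VERDICT (by name: the statement is the Claim_ definition above) =====
theorem calculate_sum_of_bit_values_spec : Claim_equal_calculate_sum_of_bit_values := by
  intro n p hc _ hpre
  unfold Spec_calculate_sum_of_bit_values
  unfold calculate_sum_of_bit_values calculate_sum_of_bit_values_alt
  by_cases hn : n ≤ p - 1
  · -- the while loop never runs; both sides are 0
    rw [pvOuterA_done n p hc _ (p - 1) 0 (by omega),
        PySem.List.pyRange_one_eq_nil hn]
    rfl
  · have hp : 1 ≤ p := by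
      rcases hpre with h | h
      · omega
      · exact h.1
    rw [pvOuterA_eq_csum n p hc hp _ (p - 1) 0 0 (le_refl 0) (by ring) (by omega)]
    rw [pvFoldl_csum p hc]
    simp [pvCsum]
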